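-- pv_equiv track=rewrite | github.com/sorinmarti/django_ndr_core | ndr_core/ndr_tag_replacer.py | translate_to_color
-- ===== SOURCE A (Python) =====
-- def translate_to_color(value, lightness=50):
--     """Translates a value to a color."""
--     if value is None:
--         return ''
--
--     hash_value = 0
--     for char in value:
--         hash_value = ord(char) + ((hash_value << 5) - hash_value)
--         hash_value = hash_value & hash_value
--
--     return f'hsl({hash_value % 360}, {100}%, {lightness}%)'
-- ===== SOURCE B (Python) =====
-- def translate_to_color(value, lightness=50):
--     """Translates a value to a color."""
--     if value is None:
--         return ''
--     n = len(value)
--     hash_value = sum(ord(c) * pow(31, n - 1 - i, 360) for i, c in enumerate(value)) % 360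
--     return f'hsl({hash_value}, {100}%, {lightness}%)'
-- ===== Notes on version B (the rewrite author's own statement) =====
-- stated objective: faster
-- what changed: Replaced A's incremental Horner accumulator (hash = ord(c) + ((hash<<5) - hash), with a no-op hash & hash) by a direct modular weighted sum hash = sum(ord(c) * pow(31, n-1-i, 360)) % 360, which keeps every term below 360*255 instead of letting the hash grow to ~5n bits.
import Mathlib
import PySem

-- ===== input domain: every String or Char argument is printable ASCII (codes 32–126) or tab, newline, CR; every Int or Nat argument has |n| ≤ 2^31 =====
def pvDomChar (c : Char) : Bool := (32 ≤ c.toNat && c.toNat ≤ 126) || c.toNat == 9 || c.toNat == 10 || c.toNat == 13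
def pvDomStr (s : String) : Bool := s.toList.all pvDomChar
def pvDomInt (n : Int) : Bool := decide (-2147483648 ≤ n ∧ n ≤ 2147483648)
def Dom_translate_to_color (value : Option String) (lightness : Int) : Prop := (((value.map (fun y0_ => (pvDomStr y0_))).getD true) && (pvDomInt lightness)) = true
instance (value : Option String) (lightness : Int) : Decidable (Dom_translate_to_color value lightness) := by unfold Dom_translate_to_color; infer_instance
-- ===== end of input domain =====

-- B replaces A's incremental shift-and-subtract (Horner) accumulator by a direct
-- modular weighted sum Σ ord(value[i])·pow(31, n-1-i, 360) (mod 360); same result, avoids big integers.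

-- ===== PORT A =====
-- step for step: hash = ord(char) + ((hash << 5) - hash); hash = hash & hash
def translate_to_color (value : Option String) (lightness : Int) : String :=
  match value with
  | none => ""
  | some v =>
    let hash_value : Int :=
      v.toList.foldl (fun h c =>
        let h' : Int := (c.toNat : Int) + ((h <<< (5 : Nat)) - h)
        PySem.Int.band h' h') 0
    "hsl(" ++ PySem.Int.toStr (PySem.Int.mod hash_value 360) ++ ", 100%, "
      ++ PySem.Int.toStr lightness ++ "%)"

-- ===== PORT B =====
-- hash_value = sum(ord(c) * pow(31, n - 1 - i, 360) for i, c in enumerate(value)) % 360;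
-- the exponent n-1-i is a nonnegative int in Python, so '.toNat' on it is exact here.
def translate_to_color_alt (value : Option String) (lightness : Int) : String :=
  match value with
  | none => ""
  | some v =>
    let n : Int := PySem.Str.len v
    let hash_value : Int :=
      PySem.Int.mod
        (((PySem.List.enumerate v.toList).map
          (fun p => (p.2.toNat : Int) * PySem.Int.powMod 31 (n - 1 - p.1).toNat 360)).sum) 360
    "hsl(" ++ PySem.Int.toStr hash_value ++ ", 100%, "
      ++ PySem.Int.toStr lightness ++ "%)"

-- ===== PRECONDITION & SPEC =====
def Spec_translate_to_color (value : Option String) (lightness : Int) (out : String) : Prop := out = translate_to_color_alt value lightness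
instance (value : Option String) (lightness : Int) (out : String) : Decidable (Spec_translate_to_color value lightness out) := by unfold Spec_translate_to_color; infer_instance

-- ===== CLAIM (what is proved, stated in full; the proofs are below) =====
def Claim_equal_translate_to_color : Prop := ∀ (value : Option String) (lightness : Int), Dom_translate_to_color value lightness → Spec_translate_to_color value lightness (translate_to_color value lightness)

-- ===== LEMMAS AND PROOFS =====

-- A's loop step is c + 31*h : the shift is *32, the subtraction leaves *31, 'h & h' is h.
lemma band_self_int (a : Int) : PySem.Int.band a a = a := by
  simp [PySem.Int.band]
  split_ifs <;> omega

lemma step_eq (h : Int) (c : Char) :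
    PySem.Int.band ((c.toNat : Int) + ((h <<< (5 : Nat)) - h))
                   ((c.toNat : Int) + ((h <<< (5 : Nat)) - h))
      = (c.toNat : Int) + 31 * h := by
  rw [band_self_int, Int.shiftLeft_eq]
  ring_nf

lemma enumerate_shift (l : List Char) (s : Int) :
    PySem.List.enumerate l (s + 1)
      = (PySem.List.enumerate l s).map (fun p => (p.1 + 1, p.2)) := by
  induction l generalizing s with
  | nil => simp [PySem.List.enumerate_nil]
  | cons c t ih => simp [PySem.List.enumerate_cons, ih]

lemma horner_sum (l : List Char) (h : Int) :
    l.foldl (fun h c => (c.toNat : Int) + 31 * h) h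
      = h * 31 ^ l.length
        + ((PySem.List.enumerate l).map
            (fun p => (p.2.toNat : Int) * 31 ^ (((l.length : Int)) - 1 - p.1).toNat)).sum := by
  induction l generalizing h with
  | nil => simp [PySem.List.enumerate_nil]
  | cons c t ih =>
    simp only [List.foldl_cons, ih, List.length_cons, PySem.List.enumerate_cons,
      List.map_cons, List.sum_cons]
    rw [enumerate_shift, List.map_map]
    have hw : ∀ p ∈ PySem.List.enumerate t 0,
        ((fun p : Int × Char => (p.2.toNat : Int) * 31 ^ ((((t.length + 1 : Nat)) : Int) - 1 - p.1).toNat)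
          ∘ fun p : Int × Char => (p.1 + 1, p.2)) p
        = (fun p : Int × Char => (p.2.toNat : Int) * 31 ^ (((t.length : Int)) - 1 - p.1).toNat) p := by
      intro p _
      simp only [Function.comp]
      have he : ((((t.length + 1 : Nat)) : Int) - 1 - (p.1 + 1)).toNat
          = (((t.length : Int)) - 1 - p.1).toNat := by omega
      rw [he]
    rw [List.map_congr_left hw]
    have hhead : ((((t.length + 1 : Nat)) : Int) - 1 - 0).toNat = t.length := by omega
    rw [hhead, pow_succ]
    ring

lemma str_len_eq (v : String) : PySem.Str.len v = (v.toList.length : Int) := by simp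

lemma sum_emod_360 {α : Type} (l : List α) (f g : α → Int)
    (h : ∀ a ∈ l, f a % 360 = g a % 360) :
    (l.map f).sum % 360 = (l.map g).sum % 360 := by
  induction l with
  | nil => rfl
  | cons a t ih =>
    simp only [List.map_cons, List.sum_cons]
    have h1 : Int.ModEq 360 (f a) (g a) := h a (by simp)
    have h2 : Int.ModEq 360 ((t.map f).sum) ((t.map g).sum) :=
      ih (fun b hb => h b (List.mem_cons_of_mem a hb))
    exact h1.add h2

-- ===== VERDICT (by name: the statement is the Claim_ definition above) =====
theorem translate_to_color_spec : Claim_equal_translate_to_color := by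
  intro value lightness _
  unfold Spec_translate_to_color translate_to_color translate_to_color_alt
  cases value with
  | none => rfl
  | some v =>
    simp only [str_len_eq]
    congr 3
    have hf : (fun (h : Int) (c : Char) =>
        let h' : Int := (c.toNat : Int) + ((h <<< (5 : Nat)) - h)
        PySem.Int.band h' h')
        = (fun (h : Int) (c : Char) => (c.toNat : Int) + 31 * h) :=
      funext fun h => funext fun c => step_eq h c
    rw [hf, horner_sum]
    rw [PySem.Int.mod_eq_emod_of_pos (by norm_num), PySem.Int.mod_eq_emod_of_pos (by norm_num)]
    simp only [zero_mul, zero_add]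
    congr 2
    apply sum_emod_360
    intro p _
    rw [PySem.Int.powMod_eq_emod 31 ((((v.toList.length : Int)) - 1 - p.1).toNat) (by norm_num)]
    exact Int.ModEq.mul_left _ (Int.emod_emod_of_dvd _ dvd_rfl).symm
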